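-- pv_equiv track=rewrite | github.com/VinhLe2213963/Torrent-Like-App | util.py | find_file_and_offset
-- ===== SOURCE A (Python) =====
-- def find_file_and_offset(files, global_offset):
--     cumulative_offsets = [0]
--     for f in files:
--         cumulative_offsets.append(cumulative_offsets[-1] + f["length"])
--
--     for i in range(len(cumulative_offsets) - 1):
--         if cumulative_offsets[i] <= global_offset < cumulative_offsets[i + 1]:
--             file_offset = global_offset - cumulative_offsets[i]
--             return i, file_offset
--     return None, None
-- ===== SOURCE B (Python) =====
-- def find_file_and_offset(files, global_offset):
--     running = 0
--     for i, f in enumerate(files):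
--         length = f["length"]
--         if running <= global_offset < running + length:
--             return i, global_offset - running
--         running += length
--     return None, None
-- ===== Notes on version B (the rewrite author's own statement) =====
-- stated objective: simpler
-- what changed: Replaces A's build-a-cumulative-offsets-table-then-scan-adjacent-pairs structure with a single pass keeping one running-sum scalar, returning on the first file whose interval contains the offset.
import Mathlib
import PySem

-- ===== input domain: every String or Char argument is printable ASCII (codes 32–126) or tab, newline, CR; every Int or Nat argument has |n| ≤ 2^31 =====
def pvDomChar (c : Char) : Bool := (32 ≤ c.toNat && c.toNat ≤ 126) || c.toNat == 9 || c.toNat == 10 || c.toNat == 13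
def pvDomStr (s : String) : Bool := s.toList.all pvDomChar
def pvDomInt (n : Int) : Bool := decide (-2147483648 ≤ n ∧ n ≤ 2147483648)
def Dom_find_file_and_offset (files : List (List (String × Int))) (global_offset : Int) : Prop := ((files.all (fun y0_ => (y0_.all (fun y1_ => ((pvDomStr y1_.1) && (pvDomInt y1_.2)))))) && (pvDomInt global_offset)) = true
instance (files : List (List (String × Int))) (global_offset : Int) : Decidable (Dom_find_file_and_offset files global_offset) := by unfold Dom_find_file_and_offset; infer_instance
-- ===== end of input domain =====

-- B replaces A's cumulative-offsets table + adjacent-pair scan by one pass with a running-sum scalar (objective: simpler).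
-- Equivalence is about the return value only; neither program mutates its arguments.

-- ===== PORT A =====
-- f["length"]: first-match lookup in the association list; Pre_ guarantees the key is present
-- (Python raises KeyError otherwise), so the `.getD 0` default is never reached inside Pre_.
def pvLen (f : List (String × Int)) : Int := (f.lookup "length").getD 0

-- second loop of A: for i in range(len(cumulative_offsets)-1): test cum[i] <= g < cum[i+1]
def pvScanPairs (g : Int) : List Int → Int → Option Int × Option Int
  | a :: b :: rest, i =>
      if a ≤ g ∧ g < b then (some i, some (g - a))
      else pvScanPairs g (b :: rest) (i + 1)
  | _, _ => (none, none)

def find_file_and_offset (files : List (List (String × Int))) (global_offset : Int) : Option Int × Option Int :=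
  -- first loop of A: cumulative_offsets = [0]; for f in files: append last + f["length"]
  let cum := files.foldl (fun acc f => acc ++ [acc.getLastD 0 + pvLen f]) [0]
  pvScanPairs global_offset cum 0

-- ===== PORT B =====
def pvAltGo (g : Int) : List (List (String × Int)) → Int → Int → Option Int × Option Int
  | [], _, _ => (none, none)
  | f :: rest, i, running =>
      let length := pvLen f
      if running ≤ g ∧ g < running + length then (some i, some (g - running))
      else pvAltGo g rest (i + 1) (running + length)

def find_file_and_offset_alt (files : List (List (String × Int))) (global_offset : Int) : Option Int × Option Int :=
  pvAltGo global_offset files 0 0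

-- ===== PRECONDITION & SPEC =====
-- Pre_ excludes only inputs where Python A raises KeyError: some file dict lacks the "length" key.
def Pre_find_file_and_offset (files : List (List (String × Int))) (global_offset : Int) : Prop :=
  ∀ f ∈ files, (f.lookup "length").isSome
instance (files : List (List (String × Int))) (global_offset : Int) : Decidable (Pre_find_file_and_offset files global_offset) := by unfold Pre_find_file_and_offset; infer_instance
def pvWitness_find_file_and_offset : (List (List (String × Int))) × Int := ([[("length", 5)], [("length", 3)]], 6)

def Spec_find_file_and_offset (files : List (List (String × Int))) (global_offset : Int) (out : Option Int × Option Int) : Prop := out = find_file_and_offset_alt files global_offset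
instance (files : List (List (String × Int))) (global_offset : Int) (out : Option Int × Option Int) : Decidable (Spec_find_file_and_offset files global_offset out) := by unfold Spec_find_file_and_offset; infer_instance

-- ===== CLAIM (what is proved, stated in full; the proofs are below) =====
def Claim_equal_find_file_and_offset : Prop := ∀ (files : List (List (String × Int))) (global_offset : Int), Dom_find_file_and_offset files global_offset → Pre_find_file_and_offset files global_offset → Spec_find_file_and_offset files global_offset (find_file_and_offset files global_offset)

-- ===== LEMMAS AND PROOFS =====

-- the suffix of cumulative offsets that A's first loop appends, starting from running sum r
def pvSums (r : Int) : List (List (String × Int)) → List Int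
  | [] => []
  | f :: rest => (r + pvLen f) :: pvSums (r + pvLen f) rest

theorem pvCum_eq (fs : List (List (String × Int))) :
    ∀ (acc : List Int) (r : Int), acc.getLastD 0 = r →
      fs.foldl (fun acc f => acc ++ [acc.getLastD 0 + pvLen f]) acc = acc ++ pvSums r fs := by
  induction fs with
  | nil => intro acc r _; simp [pvSums]
  | cons f rest ih =>
      intro acc r hr
      simp only [List.foldl_cons, pvSums]
      rw [ih (acc ++ [acc.getLastD 0 + pvLen f]) (r + pvLen f) (by rw [List.getLastD_concat, hr]), hr]
      simp

theorem pvScan_eq_alt (g : Int) (fs : List (List (String × Int))) :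
    ∀ (r i : Int), pvScanPairs g (r :: pvSums r fs) i = pvAltGo g fs i r := by
  induction fs with
  | nil => intro r i; simp [pvSums, pvScanPairs, pvAltGo]
  | cons f rest ih =>
      intro r i
      simp only [pvSums, pvScanPairs, pvAltGo]
      split_ifs with h
      · rfl
      · exact ih (r + pvLen f) (i + 1)

-- ===== VERDICT (by name: the statement is the Claim_ definition above) =====
theorem find_file_and_offset_spec : Claim_equal_find_file_and_offset := by
  intro files g _ _
  unfold Spec_find_file_and_offset find_file_and_offset find_file_and_offset_alt
  rw [pvCum_eq files [0] 0 rfl]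
  exact pvScan_eq_alt g files 0 0
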